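-- pv_equiv track=rewrite | github.com/KEUMIN/algorithm_2024 | backtracking/backtracking_basic_3.py | solution
-- ===== SOURCE A (Python) =====
-- def solution(nums: list[int], k: int, target: int) -> bool:
--     def backtrack(start: int, arr: list[int]):
--         result = False
--
--         if len(arr) == k:
--             if sum(arr) == target:
--                 return True
--             else:
--                 return False
--
--         for i in range(start, len(nums)):
--             arr.append(nums[i])
--             result = backtrack(i + 1, arr)
--             if result:
--                 return True
--             arr.pop()
--
--         return result
--
--     result = backtrack(0, [])
--     return result
-- ===== SOURCE B (Python) =====
-- def solution(nums: list[int], k: int, target: int) -> bool: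
--     # DP over reachable (count, sum) pairs instead of backtracking enumeration.
--     states = {(0, 0)}
--     for x in nums:
--         states |= {(c + 1, s + x) for (c, s) in states if c < k}
--     return (k, target) in states
-- ===== Notes on version B (the rewrite author's own statement) =====
-- stated objective: alternative
-- what changed: Replaces the recursive backtracking enumeration of all size-k combinations with a dynamic program that maintains the set of reachable (count, sum) pairs in one left-to-right pass and checks membership of (k, target); the DP deduplicates equal (count, sum) states, which helps on collision-heavy inputs but not on wide random sums.
import Mathlib
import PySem

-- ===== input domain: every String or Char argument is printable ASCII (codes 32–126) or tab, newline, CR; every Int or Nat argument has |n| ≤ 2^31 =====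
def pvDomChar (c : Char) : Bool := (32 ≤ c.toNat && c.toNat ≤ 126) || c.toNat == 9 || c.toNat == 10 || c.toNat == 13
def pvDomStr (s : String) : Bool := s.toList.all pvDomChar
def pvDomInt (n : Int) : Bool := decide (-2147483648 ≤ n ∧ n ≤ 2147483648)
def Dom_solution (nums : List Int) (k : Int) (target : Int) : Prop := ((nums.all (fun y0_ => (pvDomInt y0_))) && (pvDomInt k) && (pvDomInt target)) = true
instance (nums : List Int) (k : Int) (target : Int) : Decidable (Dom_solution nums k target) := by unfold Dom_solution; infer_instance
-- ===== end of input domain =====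

-- B replaces A's recursive backtracking over size-k combinations by a one-pass DP over
-- the set of reachable (count, sum) pairs; objective: alternative algorithm, same worst-case cost.


-- ===== PORT A =====
-- backtrack(start, arr): 'rest' is nums[start:].  The loop 'for i in range(start, len(nums))'
-- first tries arr + [nums[start]] (recursive call with start+1), and on failure continues the
-- loop with the same arr over the remaining indices; since the 'len(arr) == k' test already
-- failed for arr, continuing that loop is exactly 'btA xs arr' again.
def btA (k target : Int) : List Int → List Int → Bool
  | rest, arr =>
    if (arr.length : Int) = k then decide (arr.sum = target)
    else
      match rest with
      | [] => false
      | x :: xs => btA k target xs (arr ++ [x]) || btA k target xs arr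

def solution (nums : List Int) (k : Int) (target : Int) : Bool :=
  btA k target nums []

-- ===== PORT B =====
-- states |= {(c+1, s+x) for (c,s) in states if c < k}
def stepB (k x : Int) (st : PySem.Set (Int × Int)) : PySem.Set (Int × Int) :=
  st.foldl (fun acc cs => if cs.1 < k then PySem.Set.add acc (cs.1 + 1, cs.2 + x) else acc) st

def solution_alt (nums : List Int) (k : Int) (target : Int) : Bool :=
  PySem.Set.contains (nums.foldl (fun st x => stepB k x st) (PySem.Set.ofList [((0 : Int), (0 : Int))])) (k, target)

-- ===== PRECONDITION & SPEC =====
def Spec_solution (nums : List Int) (k : Int) (target : Int) (out : Bool) : Prop := out = solution_alt nums k target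
instance (nums : List Int) (k : Int) (target : Int) (out : Bool) : Decidable (Spec_solution nums k target out) := by unfold Spec_solution; infer_instance

-- ===== CLAIM (what is proved, stated in full; the proofs are below) =====
def Claim_equal_solution : Prop := ∀ (nums : List Int) (k : Int) (target : Int), Dom_solution nums k target → Spec_solution nums k target (solution nums k target)

-- ===== LEMMAS AND PROOFS =====

-- A's backtracking finds a sublist t of the remaining suffix completing arr to length k, sum target.
theorem btA_iff (k target : Int) : ∀ (rest arr : List Int),
    btA k target rest arr = true ↔
      ∃ t : List Int, t.Sublist rest ∧ ((arr.length : Int) + t.length = k) ∧ arr.sum + t.sum = target := by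
  intro rest
  induction rest with
  | nil =>
    intro arr
    rw [btA]
    by_cases h : (arr.length : Int) = k
    · simp only [h, if_pos, decide_eq_true_eq]
      constructor
      · intro hs; exact ⟨[], List.Sublist.refl _, by simpa using h, by simpa using hs⟩
      · rintro ⟨t, ht, _, hs⟩
        have : t = [] := List.sublist_nil.mp ht
        subst this; simpa using hs
    · simp only [h, if_false]
      refine iff_of_false (by simp) ?_
      rintro ⟨t, ht, hlen, _⟩
      have : t = [] := List.sublist_nil.mp ht
      subst this; simp at hlen; omega
  | cons x xs ih =>
    intro arr
    rw [btA]
    by_cases h : (arr.length : Int) = k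
    · simp only [h, if_pos, decide_eq_true_eq]
      constructor
      · intro hs; exact ⟨[], List.nil_sublist _, by simpa using h, by simpa using hs⟩
      · rintro ⟨t, ht, hlen, hs⟩
        have : t = [] := by
          have : (t.length : Int) = 0 := by omega
          simpa using this
        subst this; simpa using hs
    · simp only [h, if_false, Bool.or_eq_true, ih]
      constructor
      · rintro (⟨t, ht, hlen, hs⟩ | ⟨t, ht, hlen, hs⟩)
        · refine ⟨x :: t, List.cons_sublist_cons.mpr ht, ?_, ?_⟩ <;>
            simp at hlen hs ⊢ <;> omega
        · exact ⟨t, ht.cons x, hlen, hs⟩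
      · rintro ⟨t, ht, hlen, hs⟩
        rcases List.sublist_cons_iff.mp ht with h1 | ⟨t', rfl, ht'⟩
        · exact Or.inr ⟨t, h1, hlen, hs⟩
        · refine Or.inl ⟨t', ht', ?_, ?_⟩ <;> simp at hlen hs ⊢ <;> omega

-- membership after one DP step
theorem mem_stepB (k x : Int) (st : List (Int × Int)) (p : Int × Int) :
    p ∈ stepB k x st ↔ p ∈ st ∨ ∃ c s : Int, (c, s) ∈ st ∧ c < k ∧ p = (c + 1, s + x) := by
  unfold stepB
  have aux : ∀ (l acc : List (Int × Int)),
      (p ∈ l.foldl (fun acc cs => if cs.1 < k then PySem.Set.add acc (cs.1 + 1, cs.2 + x) else acc) acc ↔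
        p ∈ acc ∨ ∃ c s : Int, (c, s) ∈ l ∧ c < k ∧ p = (c + 1, s + x)) := by
    intro l
    induction l with
    | nil => simp
    | cons q l ih =>
      intro acc
      rw [List.foldl_cons, ih]
      constructor
      · rintro (hacc | ⟨c, s, hm, hc, rfl⟩)
        · by_cases hq : q.1 < k
          · rw [if_pos hq, PySem.Set.mem_add] at hacc
            rcases hacc with h | h
            · exact Or.inl h
            · refine Or.inr ⟨q.1, q.2, ?_, hq, h⟩
              exact List.mem_cons.mpr (Or.inl (Prod.mk.eta).symm)
          · rw [if_neg hq] at hacc; exact Or.inl hacc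
        · exact Or.inr ⟨c, s, List.mem_cons.mpr (Or.inr hm), hc, rfl⟩
      · rintro (hacc | ⟨c, s, hm, hc, rfl⟩)
        · left
          by_cases hq : q.1 < k
          · rw [if_pos hq, PySem.Set.mem_add]; exact Or.inl hacc
          · rwa [if_neg hq]
        · rcases List.mem_cons.mp hm with heq | hm
          · left
            have hq : q.1 < k := by rw [← heq]; exact hc
            rw [if_pos hq, PySem.Set.mem_add]
            right; rw [← heq]
          · exact Or.inr ⟨c, s, hm, hc, rfl⟩
  exact aux st st

-- the DP invariant over the whole fold
theorem mem_dp (k : Int) : ∀ (l : List Int) (init : List (Int × Int)) (p : Int × Int),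
    p ∈ l.foldl (fun st x => stepB k x st) init ↔
      ∃ (c s : Int) (t : List Int), (c, s) ∈ init ∧ t.Sublist l ∧
        p = (c + t.length, s + t.sum) ∧ (t = [] ∨ c + t.length ≤ k) := by
  intro l
  induction l with
  | nil =>
    intro init p
    simp only [List.foldl_nil]
    constructor
    · intro h; exact ⟨p.1, p.2, [], h, List.Sublist.refl _, by simp, Or.inl rfl⟩
    · rintro ⟨c, s, t, hm, ht, rfl, _⟩
      have : t = [] := List.sublist_nil.mp ht
      subst this; simpa using hm
  | cons x xs ih =>
    intro init p
    simp only [List.foldl_cons, ih, mem_stepB]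
    constructor
    · rintro ⟨c, s, t, hm, ht, rfl, hcap⟩
      rcases hm with hm | ⟨c', s', hm', hc', heq⟩
      · exact ⟨c, s, t, hm, ht.cons x, rfl, hcap⟩
      · obtain ⟨rfl, rfl⟩ : c = c' + 1 ∧ s = s' + x := by
          constructor <;> [exact congrArg Prod.fst heq; exact congrArg Prod.snd heq]
        refine ⟨c', s', x :: t, hm', List.cons_sublist_cons.mpr ht, ?_, ?_⟩
        · simp; constructor <;> ring
        · right; simp; rcases hcap with h | h
          · subst h; simp at *; omega
          · omega
    · rintro ⟨c, s, t, hm, ht, rfl, hcap⟩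
      rcases List.sublist_cons_iff.mp ht with h1 | ⟨t', rfl, ht'⟩
      · exact ⟨c, s, t, Or.inl hm, h1, rfl, hcap⟩
      · have hc' : c < k := by
          rcases hcap with h | h
          · simp at h
          · simp at h; omega
        refine ⟨c + 1, s + x, t', Or.inr ⟨c, s, hm, hc', rfl⟩, ht', ?_, ?_⟩
        · simp; constructor <;> ring
        · rcases hcap with h | h
          · simp at h
          · right; simp at h ⊢; omega

-- ===== VERDICT (by name: the statement is the Claim_ definition above) =====
theorem solution_spec : Claim_equal_solution := by
  intro nums k target _
  unfold Spec_solution solution solution_alt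
  have hA := btA_iff k target nums []
  have hB := mem_dp k nums (PySem.Set.ofList [((0 : Int), (0 : Int))]) (k, target)
  rw [Bool.eq_iff_iff]
  rw [hA]
  have hcont : PySem.Set.contains
      (nums.foldl (fun st x => stepB k x st) (PySem.Set.ofList [((0 : Int), (0 : Int))])) (k, target) = true ↔
      (k, target) ∈ nums.foldl (fun st x => stepB k x st) (PySem.Set.ofList [((0 : Int), (0 : Int))]) := by
    simp [PySem.Set.contains]
  rw [hcont, hB]
  constructor
  · rintro ⟨t, ht, hlen, hs⟩
    refine ⟨0, 0, t, by simp [PySem.Set.ofList], ht, ?_, ?_⟩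
    · simp at hlen hs ⊢; constructor <;> omega
    · rcases t with _ | _
      · exact Or.inl rfl
      · right; simp at hlen ⊢; omega
  · rintro ⟨c, s, t, hm, ht, heq, _⟩
    obtain ⟨rfl, rfl⟩ : c = 0 ∧ s = 0 := by simpa [PySem.Set.ofList] using hm
    refine ⟨t, ht, ?_, ?_⟩
    · have := congrArg Prod.fst heq; simp at this ⊢; omega
    · have := congrArg Prod.snd heq; simp at this ⊢; omega
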